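-- pv_equiv track=rewrite | github.com/daniel-reich/turbo-robot | Y4gwcGfcGb3SKz6Tu_6.py | max_separator
-- ===== SOURCE A (Python) =====
-- def max_separator(txt):
--     test = list(set(txt)); diff_max = []
--     for i in test:
--         p_i = [k for k, x in enumerate(txt) if x == i]
--         if len(p_i) > 1:
--             diff = [p_i[n] - p_i[n-1] for n in range(1,len(p_i))]
--         else:
--             diff = [0]
--         diff_max.append(max(diff))
--
--     result = [c for c, j in enumerate(diff_max) if j == max(diff_max) != 0]
--     return sorted([test[n] for n in result])
-- ===== SOURCE B (Python) =====
-- def max_separator(txt):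
--     last = {}
--     gap = {}
--     for k, c in enumerate(txt):
--         if c in last:
--             g = k - last[c]
--             if gap[c] < g:
--                 gap[c] = g
--         else:
--             gap[c] = 0
--         last[c] = k
--     m = max(gap.values(), default=0)
--     if m == 0:
--         return []
--     return sorted(c for c, g in gap.items() if g == m)
-- ===== Notes on version B (the rewrite author's own statement) =====
-- stated objective: faster
-- what changed: Replaces A's per-distinct-character rescan of the whole string (index list, difference list, max, for every distinct char) by a single left-to-right pass maintaining per character its last index and its maximal consecutive gap in two dicts.
import Mathlib
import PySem

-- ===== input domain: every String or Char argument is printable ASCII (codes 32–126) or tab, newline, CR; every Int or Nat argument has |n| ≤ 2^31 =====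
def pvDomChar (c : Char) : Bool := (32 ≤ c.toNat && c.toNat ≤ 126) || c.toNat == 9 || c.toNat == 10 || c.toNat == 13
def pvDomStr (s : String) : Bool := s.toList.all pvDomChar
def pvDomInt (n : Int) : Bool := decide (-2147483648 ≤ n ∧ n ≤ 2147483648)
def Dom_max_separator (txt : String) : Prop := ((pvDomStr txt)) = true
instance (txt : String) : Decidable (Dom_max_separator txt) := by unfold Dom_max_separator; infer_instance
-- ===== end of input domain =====

-- B is a single left-to-right pass keeping, per character, its last index and its maximal
-- consecutive gap in two dicts (O(n) over dict ops), instead of A's per-distinct-character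
-- rescan of the whole string (O(n·u)). Equivalence of the RETURN value is proved on all inputs.

-- ===== PORT A =====
-- literal port of A: list(set(txt)); per distinct char the index list, adjacent differences,
-- their max; then the chars whose value equals the (nonzero) global max, sorted.
-- (Python's set iteration order is hash-dependent, but every use below — max and a sorted
-- filter keyed by distinct values per char — is order-independent, so first-occurrence order is exact.)
def max_separator (txt : String) : List String :=
  let test := PySem.Set.ofList txt.toList
  let diff_max := test.map (fun i =>
    let p_i := ((PySem.List.enumerate txt.toList 0).filter (fun kx => kx.2 == i)).map (fun kx => kx.1)
    let diff := if p_i.length > 1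
      then (PySem.List.pyRange 1 (p_i.length : Int) 1).map
             (fun n => PySem.List.pyGetD p_i n 0 - PySem.List.pyGetD p_i (n - 1) 0)
      else [(0 : Int)]
    -- diff is never empty ([0] in the else branch, length ≥ 1 otherwise), so Python's max cannot raise
    (PySem.List.max? diff (fun x => x)).getD 0)
  -- 'j == max(diff_max) != 0': the chained comparison, evaluated only when diff_max is nonempty,
  -- in which case max? is some and getD is exact
  let result := ((PySem.List.enumerate diff_max 0).filter
      (fun cj => cj.2 == (PySem.List.max? diff_max (fun x => x)).getD 0
                 && (PySem.List.max? diff_max (fun x => x)).getD 0 != 0)).map (fun cj => cj.1)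
  (PySem.List.sorted (result.map (fun n => PySem.List.pyGetD test n ' ')) (fun c => c) false).map
    (fun c => String.ofList [c])

-- ===== PORT B =====
-- loop body of Source B: update (last, gap) at one (index, char)
def altStep (s : PySem.Dict Char Int × PySem.Dict Char Int) (kc : Int × Char) :
    PySem.Dict Char Int × PySem.Dict Char Int :=
  match s.1.get? kc.2 with
  | some p =>
      let g := kc.1 - p
      let gap' := if s.2.getD kc.2 0 < g then s.2.insert kc.2 g else s.2
      (s.1.insert kc.2 kc.1, gap')
  | none => (s.1.insert kc.2 kc.1, s.2.insert kc.2 0)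

def max_separator_alt (txt : String) : List String :=
  let st := (PySem.List.enumerate txt.toList 0).foldl altStep (PySem.Dict.empty, PySem.Dict.empty)
  let m := (PySem.List.max? st.2.values (fun x => x)).getD 0   -- max(gap.values(), default=0)
  if m == 0 then []
  else
    (PySem.List.sorted ((st.2.items.filter (fun pr => pr.2 == m)).map (fun pr => pr.1))
        (fun c => c) false).map (fun c => String.ofList [c])

-- ===== PRECONDITION & SPEC =====
def Spec_max_separator (txt : String) (out : List String) : Prop := out = max_separator_alt txt
instance (txt : String) (out : List String) : Decidable (Spec_max_separator txt out) := by unfold Spec_max_separator; infer_instance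

-- ===== CLAIM (what is proved, stated in full; the proofs are below) =====
def Claim_equal_max_separator : Prop := ∀ (txt : String), Dom_max_separator txt → Spec_max_separator txt (max_separator txt)

-- ===== LEMMAS AND PROOFS =====

def positions (c : Char) (l : List Char) : List Int :=
  ((PySem.List.enumerate l 0).filter (fun kx => kx.2 == c)).map (fun kx => kx.1)
def diffs (p : List Int) : List Int := List.zipWith (fun b a => b - a) p.tail p
def gapSpec (c : Char) (l : List Char) : Int := (diffs (positions c l)).foldl max 0

lemma positions_pairwise (c : Char) (l : List Char) : (positions c l).Pairwise (· < ·) := by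
  unfold positions
  exact ((PySem.List.pairwise_lt_enumerate l 0).filter _).map _ (fun a b hab => hab)

lemma diffs_pos (p : List Int) (hp : p.Pairwise (· < ·)) : ∀ x ∈ diffs p, 0 < x := by
  intro x hx
  obtain ⟨i, hi, hix⟩ := List.mem_iff_getElem.mp hx
  have hlt : i + 1 < p.length := by simp [diffs] at hi; omega
  have := List.pairwise_iff_getElem.mp hp i (i+1) (by omega) hlt (by omega)
  have he : (diffs p)[i] = p[i+1] - p[i] := by
    simp [diffs, List.getElem_zipWith, List.getElem_tail]
  omega

lemma range_map_eq_diffs (p : List Int) (hlen : p.length > 1) :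
    (PySem.List.pyRange 1 (p.length : Int) 1).map
      (fun n => PySem.List.pyGetD p n 0 - PySem.List.pyGetD p (n - 1) 0) = diffs p := by
  apply List.ext_getElem
  · simp [PySem.List.length_pyRange_one, diffs]
  · intro i h1 h2
    have hi : i + 1 < p.length := by
      simp [PySem.List.length_pyRange_one] at h1; omega
    rw [List.getElem_map, PySem.List.getElem_pyRange_one]
    have e1 : (1 : Int) + (i : Int) = ((i + 1 : Nat) : Int) := by push_cast; ring
    rw [e1]
    have e3 : ((i + 1 : Nat) : Int) - 1 = ((i : Nat) : Int) := by push_cast; ring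
    rw [e3]
    rw [PySem.List.pyGetD_eq_getElem p 0 (by positivity) (by exact_mod_cast hi)]
    rw [PySem.List.pyGetD_eq_getElem p 0 (by positivity) (by exact_mod_cast (by omega : i < p.length))]
    simp [diffs, List.getElem_zipWith, List.getElem_tail]

lemma aVal_eq (l : List Char) (c : Char) :
    (let p_i := positions c l
     let diff := if p_i.length > 1
        then (PySem.List.pyRange 1 (p_i.length : Int) 1).map
               (fun n => PySem.List.pyGetD p_i n 0 - PySem.List.pyGetD p_i (n - 1) 0)
        else [(0 : Int)]
     (PySem.List.max? diff (fun x => x)).getD 0) = gapSpec c l := by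
  simp only
  by_cases hlen : (positions c l).length > 1
  · rw [if_pos hlen, range_map_eq_diffs _ hlen]
    have hne : diffs (positions c l) ≠ [] := by
      intro h
      have := congrArg List.length h
      simp [diffs] at this
      omega
    obtain ⟨d, ds, hd⟩ := List.exists_cons_of_ne_nil hne
    have hdpos : 0 < d := diffs_pos _ (positions_pairwise c l) d (hd ▸ List.mem_cons_self)
    rw [hd, PySem.List.max?_id_cons]
    simp [gapSpec, hd, max_eq_right hdpos.le]
  · rw [if_neg hlen]
    have : diffs (positions c l) = [] := by
      rcases h : positions c l with _ | ⟨a, q⟩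
      · simp [diffs]
      · rcases q with _ | ⟨b, t⟩
        · simp [diffs]
        · exfalso; rw [h] at hlen; simp at hlen
    simp [gapSpec, this, PySem.List.max?_id_cons]

lemma positions_append (c : Char) (l : List Char) (x : Char) :
    positions c (l ++ [x]) = positions c l ++ (if x = c then [(l.length : Int)] else []) := by
  unfold positions
  rw [PySem.List.enumerate_append]
  by_cases hx : x = c <;>
    simp [PySem.List.enumerate_cons, PySem.List.enumerate_nil, List.filter_append, hx]

lemma positions_eq_nil_iff (c : Char) (l : List Char) : positions c l = [] ↔ c ∉ l := by
  unfold positions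
  rw [List.map_eq_nil_iff, List.filter_eq_nil_iff]
  constructor
  · intro h hc
    obtain ⟨k, hk, hkc⟩ := List.mem_iff_getElem.mp hc
    exact absurd (by simpa using hkc)
      (by simpa using h _ ((PySem.List.mem_enumerate_iff l 0 _).mpr ⟨k, hk, rfl⟩))
  · intro h kx hkx
    obtain ⟨k, hk, rfl⟩ := (PySem.List.mem_enumerate_iff l 0 kx).mp hkx
    simp only [beq_iff_eq]
    intro hc; exact h (hc ▸ List.getElem_mem hk)

lemma diffs_append_singleton (q : List Int) (h : q ≠ []) (n : Int) :
    diffs (q ++ [n]) = diffs q ++ [n - q.getLast h] := by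
  induction q with
  | nil => exact absurd rfl h
  | cons a q ih =>
    cases q with
    | nil => simp [diffs]
    | cons b t =>
      have := ih (by simp)
      simp only [diffs] at this ⊢
      simpa [List.getLast] using this

-- gapSpec after appending a repeated occurrence
lemma positions_ne_nil (c : Char) (l : List Char) (h : c ∈ l) : positions c l ≠ [] :=
  fun hn => ((positions_eq_nil_iff c l).mp hn) h

lemma gapSpec_append_self (l : List Char) (x : Char) (hx : x ∈ l) :
    gapSpec x (l ++ [x]) =
      max (gapSpec x l)
        ((l.length : Int) - (positions x l).getLast (positions_ne_nil x l hx)) := by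
  have hne : positions x l ≠ [] := positions_ne_nil x l hx
  rw [gapSpec, positions_append, if_pos rfl, diffs_append_singleton _ hne, List.foldl_append]
  simp [gapSpec]

lemma gapSpec_append_other (c : Char) (l : List Char) (x : Char) (hx : x ≠ c) :
    gapSpec c (l ++ [x]) = gapSpec c l := by
  rw [gapSpec, positions_append, if_neg hx, List.append_nil]; rfl

lemma gapSpec_append_fresh (l : List Char) (x : Char) (hx : x ∉ l) :
    gapSpec x (l ++ [x]) = 0 := by
  have : positions x l = [] := (positions_eq_nil_iff x l).mpr hx
  simp [gapSpec, positions_append, this, diffs]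

lemma altFold_inv (l : List Char) :
    ((PySem.List.enumerate l 0).foldl altStep (PySem.Dict.empty, PySem.Dict.empty)).2.keys
        = PySem.Set.ofList l ∧
    ((PySem.List.enumerate l 0).foldl altStep (PySem.Dict.empty, PySem.Dict.empty)).2.keys.Nodup ∧
    (∀ c, ((PySem.List.enumerate l 0).foldl altStep (PySem.Dict.empty, PySem.Dict.empty)).1.get? c
        = (positions c l).getLast?) ∧
    (∀ c, ((PySem.List.enumerate l 0).foldl altStep (PySem.Dict.empty, PySem.Dict.empty)).2.get? c
        = if c ∈ l then some (gapSpec c l) else none) := by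
  induction l using List.reverseRecOn with
  | nil =>
    refine ⟨rfl, by simp [PySem.Dict.keys_empty], fun c => ?_, fun c => ?_⟩ <;>
      simp [PySem.List.enumerate_nil, positions, PySem.Dict.get?_empty]
  | append_singleton l x ih =>
    obtain ⟨hk, hnd, hlast, hgap⟩ := ih
    rw [PySem.List.enumerate_append]
    simp only [List.foldl_append, PySem.List.enumerate_cons, PySem.List.enumerate_nil,
      List.foldl_cons, List.foldl_nil, zero_add]
    set st := (PySem.List.enumerate l 0).foldl altStep (PySem.Dict.empty, PySem.Dict.empty) with hst
    by_cases hxl : x ∈ l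
    · -- x seen before: last.get? x = some (last position)
      have hne : positions x l ≠ [] := positions_ne_nil x l hxl
      have hlastx : st.1.get? x = some ((positions x l).getLast hne) := by
        rw [hlast x, List.getLast?_eq_some_getLast]
      have hgapx : st.2.get? x = some (gapSpec x l) := by rw [hgap x, if_pos hxl]
      have hcont : st.2.contains x = true := by
        rw [PySem.Dict.contains_eq_isSome_get?, hgapx]; rfl
      have hgetD : st.2.getD x 0 = gapSpec x l := by
        rw [PySem.Dict.getD_eq_get?_getD, hgapx]; rfl
      unfold altStep
      rw [hlastx]
      simp only
      set g := (l.length : Int) - (positions x l).getLast hne with hg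
      have hofl : PySem.Set.ofList (l ++ [x]) = PySem.Set.ofList l := by
        rw [PySem.Set.ofList_append_singleton, PySem.Set.add_of_mem (by
          exact (PySem.Set.mem_ofList l x).mpr hxl)]
      have hmax : gapSpec x (l ++ [x]) = max (gapSpec x l) g := gapSpec_append_self l x hxl
      refine ⟨?_, ?_, fun c => ?_, fun c => ?_⟩
      · -- keys
        split
        · rw [PySem.Dict.keys_insert_of_contains _ _ hcont, hk, hofl]
        · rw [hk, hofl]
      · split
        · rw [PySem.Dict.keys_insert_of_contains _ _ hcont]; exact hnd
        · exact hnd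
      · by_cases hcx : c = x
        · subst hcx
          rw [PySem.Dict.get?_insert_self, positions_append, if_pos rfl,
            List.getLast?_concat]
        · rw [PySem.Dict.get?_insert_of_ne _ _ hcx, hlast c, positions_append,
            if_neg (fun h => hcx h.symm), List.append_nil]
      · by_cases hcx : c = x
        · subst hcx
          have hmem : c ∈ l ++ [c] := by simp
          rw [if_pos hmem, hmax]
          split
          · next hlt =>
            rw [PySem.Dict.get?_insert_self]
            congr 1
            rw [hgetD] at hlt
            omega
          · next hlt =>
            rw [hgapx]
            congr 1
            rw [hgetD] at hlt
            omega
        · have : (c ∈ l ++ [x]) ↔ c ∈ l := by simp [hcx]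
          rw [gapSpec_append_other c l x (fun h => hcx h.symm)]
          split
          · rw [PySem.Dict.get?_insert_of_ne _ _ hcx, hgap c]; simp [this]
          · rw [hgap c]; simp [this]
    · -- x fresh
      have hpos : positions x l = [] := (positions_eq_nil_iff x l).mpr hxl
      have hlastx : st.1.get? x = none := by rw [hlast x, hpos]; rfl
      have hgapx : st.2.get? x = none := by rw [hgap x, if_neg hxl]
      have hcont : st.2.contains x = false := by
        rw [PySem.Dict.contains_eq_isSome_get?, hgapx]; rfl
      unfold altStep
      rw [hlastx]
      simp only
      have hofl : PySem.Set.ofList (l ++ [x]) = PySem.Set.ofList l ++ [x] := by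
        rw [PySem.Set.ofList_append_singleton, PySem.Set.add_of_not_mem (fun h =>
          hxl ((PySem.Set.mem_ofList l x).mp h))]
      refine ⟨?_, ?_, fun c => ?_, fun c => ?_⟩
      · rw [PySem.Dict.keys_insert_of_not_contains _ _ hcont, hk, hofl]
      · rw [PySem.Dict.keys_insert_of_not_contains _ _ hcont]
        simp only [List.nodup_append]
        refine ⟨hnd, List.nodup_singleton x, ?_⟩
        intro a ha b
        simp only [List.mem_singleton]
        rintro rfl h
        subst h
        exact hxl ((PySem.Set.mem_ofList l a).mp (hk ▸ ha))
      · by_cases hcx : c = x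
        · subst hcx
          rw [PySem.Dict.get?_insert_self, positions_append, if_pos rfl, hpos,
            List.nil_append, List.getLast?_singleton]
        · rw [PySem.Dict.get?_insert_of_ne _ _ hcx, hlast c, positions_append,
            if_neg (fun h => hcx h.symm), List.append_nil]
      · by_cases hcx : c = x
        · subst hcx
          have hmem : c ∈ l ++ [c] := by simp
          rw [if_pos hmem, PySem.Dict.get?_insert_self, gapSpec_append_fresh l c hxl]
        · have : (c ∈ l ++ [x]) ↔ c ∈ l := by simp [hcx]
          rw [gapSpec_append_other c l x (fun h => hcx h.symm),
            PySem.Dict.get?_insert_of_ne _ _ hcx, hgap c]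
          simp [this]

lemma enumerate_map {α β : Type} (f : α → β) (xs : List α) (s : Int) :
    PySem.List.enumerate (xs.map f) s
      = (PySem.List.enumerate xs s).map (fun kx => (kx.1, f kx.2)) := by
  induction xs generalizing s with
  | nil => simp [PySem.List.enumerate_nil]
  | cons a t ih => simp [PySem.List.enumerate_cons, ih]

lemma enum_filter_get {α : Type} (xs : List α) (q : α → Bool) (d : α) :
    ((PySem.List.enumerate xs 0).filter (fun kx => q kx.2)).map
        (fun kx => PySem.List.pyGetD xs kx.1 d) = xs.filter q := by
  have h1 : ((PySem.List.enumerate xs 0).filter (fun kx => q kx.2)).map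
      (fun kx => PySem.List.pyGetD xs kx.1 d)
      = ((PySem.List.enumerate xs 0).filter (fun kx => q kx.2)).map (fun kx => kx.2) := by
    apply List.map_congr_left
    intro kx hkx
    obtain ⟨k, hk, rfl⟩ := (PySem.List.mem_enumerate_iff xs 0 kx).mp (List.mem_of_mem_filter hkx)
    simp only [zero_add]
    rw [PySem.List.pyGetD_eq_getElem xs d (by positivity) (by exact_mod_cast hk)]
    simp
  rw [h1]
  have h2 : (fun kx : Int × α => q kx.2) = (q ∘ (fun kx : Int × α => kx.2)) := rfl
  rw [h2, ← List.filter_map, PySem.List.map_snd_enumerate]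

-- ===== VERDICT (by name: the statement is the Claim_ definition above) =====
-- the common final shape of both programs
lemma filtered_chars (ts : List Char) (g : Char → Int) (m : Int) :
    ((PySem.List.enumerate (ts.map g) 0).filter (fun cj => cj.2 == m && m != 0)).map
      ((fun n => PySem.List.pyGetD ts n ' ') ∘ (fun cj : Int × Int => cj.1))
    = ts.filter (fun c => g c == m && m != 0) := by
  rw [enumerate_map, List.filter_map, List.map_map]
  exact enum_filter_get ts (fun c => g c == m && m != 0) ' '

theorem max_separator_spec : Claim_equal_max_separator := by
  intro txt _
  unfold Spec_max_separator max_separator max_separator_alt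
  obtain ⟨hk, hnd, hlast, hgap⟩ := altFold_inv txt.toList
  set st := (PySem.List.enumerate txt.toList 0).foldl altStep (PySem.Dict.empty, PySem.Dict.empty)
    with hst
  -- A's per-character values are gapSpec
  have hdm : (PySem.Set.ofList txt.toList).map (fun i =>
      let p_i := ((PySem.List.enumerate txt.toList 0).filter (fun kx => kx.2 == i)).map (fun kx => kx.1)
      let diff := if p_i.length > 1
        then (PySem.List.pyRange 1 (p_i.length : Int) 1).map
               (fun n => PySem.List.pyGetD p_i n 0 - PySem.List.pyGetD p_i (n - 1) 0)
        else [(0 : Int)]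
      (PySem.List.max? diff (fun x => x)).getD 0)
      = (PySem.Set.ofList txt.toList).map (fun c => gapSpec c txt.toList) :=
    List.map_congr_left (fun c _ => aVal_eq txt.toList c)
  -- B's dict items are exactly (c, gapSpec c) over (PySem.Set.ofList txt.toList)
  have hitems : st.2.items = (PySem.Set.ofList txt.toList).map (fun c => (c, gapSpec c txt.toList)) := by
    rw [PySem.Dict.items_eq_map_keys st.2 hnd 0, hk]
    apply List.map_congr_left
    intro c hc
    rw [PySem.Dict.getD_eq_get?_getD, hgap c,
      if_pos ((PySem.Set.mem_ofList txt.toList c).mp hc)]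
    rfl
  have hvals : st.2.values = (PySem.Set.ofList txt.toList).map (fun c => gapSpec c txt.toList) := by
    show st.2.items.map (fun p => p.2) = _
    rw [hitems, List.map_map]
    rfl
  simp only [hdm, hvals]
  set m := (PySem.List.max? ((PySem.Set.ofList txt.toList).map (fun c => gapSpec c txt.toList)) (fun x => x)).getD 0
    with hm
  by_cases hm0 : m = 0
  · -- A filters with '…&& m != 0' (false); B returns [] directly
    have : (fun cj : Int × Int => cj.2 == m && m != 0) = fun _ => false := by
      funext cj; simp [hm0]
    rw [this]
    simp [hm0, PySem.List.sorted_eq_nil_iff]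
  · rw [if_neg (by simpa using hm0)]
    rw [List.map_map, filtered_chars (PySem.Set.ofList txt.toList) (fun c => gapSpec c txt.toList) m,
      hitems, List.filter_map, List.map_map]
    have hpred : ((fun pr : Char × Int => pr.2 == m) ∘ fun c => (c, gapSpec c txt.toList))
        = fun c => gapSpec c txt.toList == m := rfl
    have hpred2 : (fun c => gapSpec c txt.toList == m && m != 0)
        = fun c => gapSpec c txt.toList == m := by
      funext c; simp [hm0]
    rw [hpred, hpred2]
    have hid : ((fun pr : Char × Int => pr.1) ∘ fun c => (c, gapSpec c txt.toList)) = id := rfl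
    rw [hid, List.map_id]
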